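-- pv_equiv track=rewrite | github.com/rishsharma1996/Basketball_Statistics | data.py | get_specific_data
-- ===== SOURCE A (Python) =====
-- def get_index(data,key,query):
-- 	pos = []
-- 	for val in range(len(data[key])):
-- 		if data[key][val] == query:
-- 			pos.append(val)
-- 	return pos
--
-- def get_specific_data(data,att,query):
--
-- 	specific_info = {}
--
-- 	#all the index positions of given player
-- 	pos = get_index(data,att,query)
--
-- 	for i in pos:
--
-- 		for key in data.keys():
--
-- 			try:
-- 				specific_info[key].append(data[key][i])
-- 			except KeyError:
-- 				specific_info[key] = [data[key][i]]
-- 	return specific_info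
-- ===== SOURCE B (Python) =====
-- def get_specific_data(data, att, query):
--     col = data[att]
--     if query not in col:
--         return {}
--     return {key: [v for a, v in zip(col, vals) if a == query]
--             for key, vals in data.items()}
-- ===== Notes on version B (the rewrite author's own statement) =====
-- stated objective: simpler
-- what changed: B never computes matching row indices at all: it zips each column pairwise with the attribute column and keeps the values whose paired attribute equals the query (one comprehension per key, a membership test for the no-match case), instead of A's index collection followed by row-major indexed gathering with try/except dict initialisation.
import Mathlib
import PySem

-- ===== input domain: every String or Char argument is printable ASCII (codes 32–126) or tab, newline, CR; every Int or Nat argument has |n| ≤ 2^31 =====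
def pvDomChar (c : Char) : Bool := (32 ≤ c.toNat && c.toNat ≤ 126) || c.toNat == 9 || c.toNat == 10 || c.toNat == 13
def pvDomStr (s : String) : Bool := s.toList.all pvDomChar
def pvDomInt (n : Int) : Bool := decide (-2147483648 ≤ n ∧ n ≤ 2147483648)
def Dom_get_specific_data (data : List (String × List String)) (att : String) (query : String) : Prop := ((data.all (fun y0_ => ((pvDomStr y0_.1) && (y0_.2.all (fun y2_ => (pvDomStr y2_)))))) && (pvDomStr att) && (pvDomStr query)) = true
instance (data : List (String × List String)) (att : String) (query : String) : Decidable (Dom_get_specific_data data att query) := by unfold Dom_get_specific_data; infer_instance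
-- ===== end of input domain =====

-- B drops A's index collection + try/except row-major accumulation entirely: each column is zip-filtered against the attribute column; objective: simpler.


-- ===== PORT A =====
def get_index (data : List (String × List String)) (key : String) (query : String) : List Int :=
  let col := ((PySem.Dict.mk data).get? key).getD []
  (PySem.List.pyRange 0 col.length 1).foldl
    (fun pos val => if PySem.List.pyGetD col val "" == query then pos ++ [val] else pos) []

def get_specific_data (data : List (String × List String)) (att : String) (query : String) : List (String × List String) :=
  let d := PySem.Dict.mk data
  let pos := get_index data att query
  (pos.foldl (fun si i =>
      (d.keys).foldl (fun si key =>
        match si.get? key with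
        | some xs => si.insert key (xs ++ [PySem.List.pyGetD (d.getD key []) i ""])
        | none => si.insert key [PySem.List.pyGetD (d.getD key []) i ""]) si)
    PySem.Dict.empty).items

-- ===== PORT B =====
def get_specific_data_alt (data : List (String × List String)) (att : String) (query : String) : List (String × List String) :=
  let d := PySem.Dict.mk data
  let col := (d.get? att).getD []
  if !(col.contains query) then []
  else d.items.map (fun kv =>
    (kv.1, (col.zip kv.2).filterMap (fun p => if p.1 == query then some p.2 else none)))

-- ===== PRECONDITION & SPEC =====
-- Pre_ excludes (a) inputs where the Python raises: att not a key (KeyError) or some column shorter than a matching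
-- index (IndexError); and (b) association lists with duplicate keys, which no Python dict can represent (the
-- dict-as-association-list reading is ambiguous there).
def Pre_get_specific_data (data : List (String × List String)) (att : String) (query : String) : Prop :=
  (data.map Prod.fst).Nodup ∧
  ((PySem.Dict.mk data).get? att).isSome = true ∧
  ∀ kv ∈ data, ∀ i ∈ List.range (((PySem.Dict.mk data).get? att).getD []).length,
    (((PySem.Dict.mk data).get? att).getD []).getD i "" = query → i < kv.2.length
instance (data : List (String × List String)) (att : String) (query : String) : Decidable (Pre_get_specific_data data att query) := by unfold Pre_get_specific_data; infer_instance

def pvWitness_get_specific_data : (List (String × List String)) × String × String :=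
  ([("name", ["bob", "amy", "bob"]), ("pts", ["3", "7", "9"])], "name", "bob")


def Spec_get_specific_data (data : List (String × List String)) (att : String) (query : String) (out : List (String × List String)) : Prop := out = get_specific_data_alt data att query
instance (data : List (String × List String)) (att : String) (query : String) (out : List (String × List String)) : Decidable (Spec_get_specific_data data att query out) := by unfold Spec_get_specific_data; infer_instance

-- ===== CLAIM (what is proved, stated in full; the proofs are below) =====
def Claim_equal_get_specific_data : Prop := ∀ (data : List (String × List String)) (att : String) (query : String), Dom_get_specific_data data att query → Pre_get_specific_data data att query → Spec_get_specific_data data att query (get_specific_data data att query)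


-- ===== LEMMAS AND PROOFS =====

def pvA_step (w : String → Int → String) (i : Int) (si : PySem.Dict String (List String)) (k : String) : PySem.Dict String (List String) :=
  match si.get? k with
  | some xs => si.insert k (xs ++ [w k i])
  | none => si.insert k [w k i]

lemma pv_items_mk {κ ν : Type} (l : List (κ × ν)) : (PySem.Dict.mk l).items = l := rfl

lemma pv_keys_map (L : List String) (f : String → List String) :
    (PySem.Dict.mk (L.map (fun k => (k, f k)))).keys = L := by
  simp [PySem.Dict.keys_mk, List.map_map, Function.comp_def]

lemma pv_get?_map (L : List String) (hL : L.Nodup) (f : String → List String) {k₀ : String}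
    (hk : k₀ ∈ L) : (PySem.Dict.mk (L.map (fun k => (k, f k)))).get? k₀ = some (f k₀) := by
  apply PySem.Dict.get?_of_mem_items
  · exact List.mem_map_of_mem hk
  · rw [pv_keys_map]; exact hL

lemma pv_insert_map (L : List String) (f : String → List String) {k₀ : String} (hk : k₀ ∈ L)
    (v : List String) :
    (PySem.Dict.mk (L.map (fun k => (k, f k)))).insert k₀ v =
      PySem.Dict.mk (L.map (fun k => (k, if k = k₀ then v else f k))) := by
  apply PySem.Dict.ext
  rw [PySem.Dict.items_insert_of_contains]
  · rw [pv_items_mk, pv_items_mk, List.map_map]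
    apply List.map_congr_left
    intro a _
    by_cases h : a = k₀ <;> simp [h]
  · rw [PySem.Dict.contains_eq_decide_mem_keys, pv_keys_map]
    simpa using hk

lemma pv_inner_full (w : String → Int → String) (i : Int) (L : List String) (hL : L.Nodup) :
    ∀ (ks' : List String), (∀ k ∈ ks', k ∈ L) → ks'.Nodup → ∀ (f : String → List String),
    ks'.foldl (pvA_step w i) (PySem.Dict.mk (L.map (fun k => (k, f k)))) =
      PySem.Dict.mk (L.map (fun k => (k, if k ∈ ks' then f k ++ [w k i] else f k))) := by
  intro ks'
  induction ks' with
  | nil => intro _ _ f; simp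
  | cons k₀ tl ih =>
    intro hsub hnd f
    have hk₀ : k₀ ∈ L := hsub k₀ (by simp)
    have h1 : pvA_step w i (PySem.Dict.mk (L.map (fun k => (k, f k)))) k₀ =
        PySem.Dict.mk (L.map (fun k => (k, if k = k₀ then f k₀ ++ [w k₀ i] else f k))) := by
      rw [pvA_step, pv_get?_map L hL f hk₀]
      exact pv_insert_map L f hk₀ _
    rw [List.foldl_cons, h1,
      ih (fun k hk => hsub k (by simp [hk])) hnd.of_cons (fun k => if k = k₀ then f k₀ ++ [w k₀ i] else f k)]
    congr 1
    apply List.map_congr_left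
    intro a _
    by_cases h : a = k₀
    · subst h
      have : a ∉ tl := (List.nodup_cons.mp hnd).1
      simp [this]
    · simp [h]

lemma pv_inner_first (w : String → Int → String) (i : Int) :
    ∀ (ks' : List String), ks'.Nodup → ∀ (done : List (String × List String)),
    (∀ k ∈ ks', k ∉ done.map Prod.fst) →
    ks'.foldl (pvA_step w i) (PySem.Dict.mk done) =
      PySem.Dict.mk (done ++ ks'.map (fun k => (k, [w k i]))) := by
  intro ks'
  induction ks' with
  | nil => intro _ done _; simp
  | cons k₀ tl ih =>
    intro hnd done hdis
    have hk₀ : k₀ ∉ done.map Prod.fst := hdis k₀ (by simp)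
    have hget : (PySem.Dict.mk done).get? k₀ = none := by
      rw [PySem.Dict.get?_eq_none_iff_not_mem_keys, PySem.Dict.keys_mk]
      exact hk₀
    have h1 : pvA_step w i (PySem.Dict.mk done) k₀ = PySem.Dict.mk (done ++ [(k₀, [w k₀ i])]) := by
      have hcont : (PySem.Dict.mk done).contains k₀ = false := by
        rw [PySem.Dict.contains_eq_decide_mem_keys, PySem.Dict.keys_mk]
        simpa using hk₀
      rw [pvA_step, hget]
      apply PySem.Dict.ext
      rw [PySem.Dict.items_insert_of_not_contains _ _ hcont]
    rw [List.foldl_cons, h1, ih hnd.of_cons (done ++ [(k₀, [w k₀ i])]) ?_]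
    · simp
    · intro k hk
      have h2 : k ∉ List.map Prod.fst done := hdis k (by simp [hk])
      have hne : k ≠ k₀ := by
        rintro rfl; exact (List.nodup_cons.mp hnd).1 hk
      simp [h2, hne]

lemma pv_outer (w : String → Int → String) (L : List String) (hL : L.Nodup) :
    ∀ (rest ps : List Int),
    rest.foldl (fun si i => L.foldl (pvA_step w i) si)
        (PySem.Dict.mk (L.map (fun k => (k, ps.map (w k))))) =
      PySem.Dict.mk (L.map (fun k => (k, (ps ++ rest).map (w k)))) := by
  intro rest
  induction rest with
  | nil => intro ps; simp
  | cons i tl ih =>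
    intro ps
    rw [List.foldl_cons, pv_inner_full w i L hL L (fun _ h => h) hL (fun k => ps.map (w k))]
    have h2 : (PySem.Dict.mk (L.map fun k => (k, if k ∈ L then (ps.map (w k)) ++ [w k i] else ps.map (w k)))) =
        PySem.Dict.mk (L.map fun k => (k, (ps ++ [i]).map (w k))) := by
      apply PySem.Dict.ext
      rw [pv_items_mk, pv_items_mk]
      apply List.map_congr_left
      intro a ha
      simp [ha]
    rw [h2, ih (ps ++ [i])]
    simp

lemma pv_filter_range_cons (x : String) (xs : List String) (q : String) :
    (List.range (x :: xs).length).filter (fun k => (x :: xs).getD k "" == q) =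
      (if x == q then [0] else []) ++
        ((List.range xs.length).filter (fun k => xs.getD k "" == q)).map (· + 1) := by
  rw [List.length_cons, List.range_succ_eq_map, List.filter_cons, List.filter_map]
  by_cases h : (x == q) = true <;> simp [h, Function.comp_def]

lemma pv_posA (col : List String) (q : String) :
    (PySem.List.pyRange 0 (col.length : Int) 1).foldl
        (fun pos val => if PySem.List.pyGetD col val "" == q then pos ++ [val] else pos) [] =
      ((List.range col.length).filter (fun k => col.getD k "" == q)).map (fun (k : Nat) => (k : Int)) := by
  rw [PySem.List.pyRange_zero_nat]
  rw [show (fun (pos : List Int) (val : Int) => if PySem.List.pyGetD col val "" == q then pos ++ [val] else pos) =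
    (fun (pos : List Int) (val : Int) => if PySem.List.pyGetD col val "" == q then pos ++ [id val] else pos) from rfl]
  rw [PySem.List.foldl_append_if (fun val => PySem.List.pyGetD col val "" == q) id, List.filter_map]
  simp [Function.comp_def]

-- pos is empty exactly when the query is not in the attribute column
lemma pv_contains_iff (q : String) : ∀ (col : List String),
    ((List.range col.length).filter (fun k => col.getD k "" == q) = []) ↔ col.contains q = false := by
  intro col
  induction col with
  | nil => simp
  | cons x xs ih =>
    rw [pv_filter_range_cons]
    by_cases h : x = q
    · subst h; simp
    · have hb : (x == q) = false := by simpa using h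
      rw [hb]
      simpa [Ne.symm h] using ih

-- the zip-filter of a column equals the indexed gather over the matching positions,
-- provided every matching position is inside the column
lemma pv_zip_filter (q : String) : ∀ (col vs : List String),
    (∀ i ∈ List.range col.length, col.getD i "" = q → i < vs.length) →
    (col.zip vs).filterMap (fun p => if p.1 == q then some p.2 else none) =
      ((List.range col.length).filter (fun k => col.getD k "" == q)).map (fun i => vs.getD i "") := by
  intro col
  induction col with
  | nil => intro vs _; simp
  | cons x xs ih =>
    intro vs hlen
    cases vs with
    | nil =>
      have hFil : (List.range (x :: xs).length).filter (fun k => (x :: xs).getD k "" == q) = [] := by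
        rw [List.filter_eq_nil_iff]
        intro a ha hc
        have := hlen a ha (by simpa using hc)
        simp at this
      rw [hFil]; simp
    | cons v ws =>
      have hsh : ∀ i ∈ List.range xs.length, xs.getD i "" = q → i < ws.length := by
        intro i hi hq
        have h1 : i + 1 ∈ List.range (x :: xs).length := by
          simp at hi ⊢; omega
        have h2 : (x :: xs).getD (i + 1) "" = q := by simpa using hq
        have := hlen (i + 1) h1 h2
        simp at this; omega
      rw [List.zip_cons_cons, List.filterMap_cons, pv_filter_range_cons, List.map_append,
        List.map_map, ih ws hsh]
      have h3 : List.map ((fun i => (v :: ws).getD i "") ∘ (· + 1))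
            ((List.range xs.length).filter (fun k => xs.getD k "" == q)) =
          List.map (fun i => ws.getD i "")
            ((List.range xs.length).filter (fun k => xs.getD k "" == q)) := by
        apply List.map_congr_left; intro a _; simp [Function.comp]
      rw [h3]
      by_cases h : (x == q) = true <;> simp [h]

lemma pv_A_eq (data : List (String × List String)) (att : String) (query : String) :
    get_specific_data data att query =
      ((get_index data att query).foldl
        (fun si i => ((PySem.Dict.mk data).keys).foldl
          (pvA_step (fun k i => PySem.List.pyGetD ((PySem.Dict.mk data).getD k []) i "") i) si)
        PySem.Dict.empty).items := rfl

-- ===== VERDICT (by name: the statements are the Claim_ definitions above) =====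
theorem get_specific_data_spec : Claim_equal_get_specific_data := by
  intro data att query _ hpre
  obtain ⟨hnd, -, hlen⟩ := hpre
  have hnd' : (data.map (fun x => x.1)).Nodup := hnd
  rw [Spec_get_specific_data, pv_A_eq, get_specific_data_alt, get_index]
  set w : String → Int → String :=
    fun k i => PySem.List.pyGetD ((PySem.Dict.mk data).getD k []) i "" with hw
  set col := ((PySem.Dict.mk data).get? att).getD [] with hcol
  set L := data.map (fun x => x.1) with hL
  have hkeys : (PySem.Dict.mk data).keys = L := PySem.Dict.keys_mk data
  rw [pv_posA col query, hkeys]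
  cases hFc : (List.range col.length).filter (fun k => col.getD k "" == query) with
  | nil =>
    have hc : col.contains query = false := (pv_contains_iff query col).mp hFc
    rw [hc]
    simp [PySem.Dict.empty, pv_items_mk]
  | cons n₀ F' =>
    have hc : col.contains query = true := by
      cases h : col.contains query
      · have h2 := (pv_contains_iff query col).mpr h
        rw [hFc] at h2
        exact absurd h2 (by simp)
      · rfl
    rw [List.map_cons, List.foldl_cons]
    have hstart : List.foldl (pvA_step w ((n₀ : Nat) : Int)) PySem.Dict.empty L =
        PySem.Dict.mk (L.map (fun k => (k, ([((n₀ : Nat) : Int)]).map (w k)))) := by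
      have h0 := pv_inner_first w ((n₀ : Nat) : Int) L hnd' [] (by simp)
      simpa using h0
    rw [hstart, pv_outer w L hnd' (List.map (fun (k : Nat) => (k : Int)) F') [((n₀ : Nat) : Int)]]
    rw [pv_items_mk, hc]
    simp only [Bool.not_true, Bool.false_eq_true, if_false]
    rw [hL, List.map_map]
    apply List.map_congr_left
    intro kv hkv
    simp only [Function.comp_def]
    congr 1
    have hgets : (PySem.Dict.mk data).getD kv.1 [] = kv.2 := by
      apply PySem.Dict.getD_of_mem_items
      · rw [pv_items_mk]; exact hkv
      · rw [PySem.Dict.keys_mk]; exact hnd'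
    have hcast : ([((n₀ : Nat) : Int)] ++ List.map (fun (k : Nat) => (k : Int)) F') =
        ((List.range col.length).filter (fun k => col.getD k "" == query)).map (fun (k : Nat) => (k : Int)) := by
      rw [hFc]; rfl
    rw [hcast, List.map_map]
    have hmap : List.map ((w kv.1) ∘ (fun (k : Nat) => (k : Int)))
          ((List.range col.length).filter (fun k => col.getD k "" == query)) =
        List.map (fun i => kv.2.getD i "")
          ((List.range col.length).filter (fun k => col.getD k "" == query)) := by
      apply List.map_congr_left
      intro a _
      simp [hw, Function.comp, hgets, PySem.List.pyGetD_natCast]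
    rw [hmap, pv_zip_filter query col kv.2 (hlen kv hkv)]
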